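-- pv_equiv track=rewrite | github.com/simon-keith/adventofcode | adventofcode/aoc2021/day05.py | iter_coords
-- ===== SOURCE A (Python) =====
-- from typing import Iterable
-- from typing import Iterator
-- from typing import Tuple
--
-- def sign(a: int, b: int) -> int:
--     if a == b:
--         return 0
--     return 1 if b > a else -1
--
-- def iter_coords(
--     segment: Iterable[int],
--     allow_diag: bool,
-- ) -> Iterator[Tuple[int, int]]:
--     x1, y1, x2, y2 = segment
--     dx = sign(x1, x2)
--     dy = sign(y1, y2)
--     if allow_diag or dx == 0 or dy == 0:
--         yield x1, y1
--         while x1 != x2 or y1 != y2: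
--             x1 += dx
--             y1 += dy
--             yield x1, y1
-- ===== SOURCE B (Python) =====
-- def iter_coords(segment, allow_diag):
--     x1, y1, x2, y2 = segment
--     dx = (x2 > x1) - (x2 < x1)
--     dy = (y2 > y1) - (y2 < y1)
--     if allow_diag or dx == 0 or dy == 0:
--         n = max(abs(x2 - x1), abs(y2 - y1))
--         for i in range(n + 1):
--             yield x1 + i * dx, y1 + i * dy
-- ===== Notes on version B (the rewrite author's own statement) =====
-- stated objective: simpler
-- what changed: The while loop stepping (x1,y1) until it equals (x2,y2) is replaced by computing the trip count n = max(|x2-x1|,|y2-y1|) up front and emitting (x1+i*dx, y1+i*dy) for i in range(n+1); the sign helper becomes the (b>a)-(b<a) idiom.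
import Mathlib
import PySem

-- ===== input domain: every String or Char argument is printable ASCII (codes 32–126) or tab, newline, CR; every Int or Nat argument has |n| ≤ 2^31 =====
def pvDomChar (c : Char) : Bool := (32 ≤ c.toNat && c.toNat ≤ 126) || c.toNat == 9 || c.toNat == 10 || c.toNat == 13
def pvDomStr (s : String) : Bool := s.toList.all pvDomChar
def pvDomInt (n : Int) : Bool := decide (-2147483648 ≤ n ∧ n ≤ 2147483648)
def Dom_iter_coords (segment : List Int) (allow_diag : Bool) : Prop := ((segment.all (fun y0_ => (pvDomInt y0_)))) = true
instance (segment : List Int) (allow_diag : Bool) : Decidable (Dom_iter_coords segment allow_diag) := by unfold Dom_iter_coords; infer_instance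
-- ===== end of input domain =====

-- B replaces A's step-until-equal while loop by a counted loop over a precomputed trip count; objective: simpler.
-- A is a generator: exceptions/divergence surface on iteration; Pre_ excludes them.

-- ===== PORT A =====
def sign (a b : Int) : Int :=
  if a = b then 0 else if b > a then 1 else -1

-- A's 'while x1 != x2 or y1 != y2' loop; fuel = |x2-x1| + |y2-y1| suffices on Pre_
def iterLoopA (fuel : Nat) (x1 y1 x2 y2 dx dy : Int) : List (Int × Int) :=
  match fuel with
  | 0 => []
  | fuel + 1 =>
    if x1 ≠ x2 ∨ y1 ≠ y2 then
      (x1 + dx, y1 + dy) :: iterLoopA fuel (x1 + dx) (y1 + dy) x2 y2 dx dy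
    else []

def iter_coords (segment : List Int) (allow_diag : Bool) : List (Int × Int) :=
  match segment with
  | [x1, y1, x2, y2] =>
    let dx := sign x1 x2
    let dy := sign y1 y2
    if allow_diag || dx == 0 || dy == 0 then
      (x1, y1) :: iterLoopA ((x2 - x1).natAbs + (y2 - y1).natAbs) x1 y1 x2 y2 dx dy
    else []
  | _ => []   -- unpacking raises ValueError; excluded by Pre_

-- ===== PORT B =====
-- index-based hand-port of the unpack 'x1, y1, x2, y2 = segment' (ValueError lengths are outside Pre_)
def iter_coords_alt (segment : List Int) (allow_diag : Bool) : List (Int × Int) :=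
  if segment.length == 4 then
    let x1 := segment.getD 0 0
    let y1 := segment.getD 1 0
    let x2 := segment.getD 2 0
    let y2 := segment.getD 3 0
    let dx : Int := (if x2 > x1 then 1 else 0) - (if x2 < x1 then 1 else 0)
    let dy : Int := (if y2 > y1 then 1 else 0) - (if y2 < y1 then 1 else 0)
    if allow_diag || dx == 0 || dy == 0 then
      let n : Int := max |x2 - x1| |y2 - y1|
      (PySem.List.pyRange 0 (n + 1) 1).map (fun i => (x1 + i * dx, y1 + i * dy))
    else []
  else []

-- ===== PRECONDITION & SPEC =====
-- Pre_ excludes (a) segments of length ≠ 4, on which A's unpacking raises ValueError, and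
-- (b) with allow_diag, non-45° segments with both coordinates changing, on which A's while loop never terminates.
def Pre_iter_coords (segment : List Int) (allow_diag : Bool) : Prop :=
  segment.length = 4 ∧
  (allow_diag = true →
    segment.getD 0 0 = segment.getD 2 0 ∨ segment.getD 1 0 = segment.getD 3 0 ∨
    (segment.getD 2 0 - segment.getD 0 0).natAbs = (segment.getD 3 0 - segment.getD 1 0).natAbs)

instance (segment : List Int) (allow_diag : Bool) : Decidable (Pre_iter_coords segment allow_diag) := by
  unfold Pre_iter_coords; infer_instance

def pvWitness_iter_coords : List Int × Bool := ([1, 1, 4, 4], true)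

def Spec_iter_coords (segment : List Int) (allow_diag : Bool) (out : List (Int × Int)) : Prop := out = iter_coords_alt segment allow_diag
instance (segment : List Int) (allow_diag : Bool) (out : List (Int × Int)) : Decidable (Spec_iter_coords segment allow_diag out) := by unfold Spec_iter_coords; infer_instance

-- ===== CLAIM (what is proved, stated in full; the proofs are below) =====
def Claim_equal_iter_coords : Prop := ∀ (segment : List Int) (allow_diag : Bool), Dom_iter_coords segment allow_diag → Pre_iter_coords segment allow_diag → Spec_iter_coords segment allow_diag (iter_coords segment allow_diag)

-- ===== LEMMAS AND PROOFS =====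

-- A's loop, started so that the target is exactly n steps of (dx,dy) away, yields the n counted points.
lemma iterLoopA_counted (n : Nat) :
    ∀ (fuel : Nat) (x1 y1 dx dy : Int), n ≤ fuel → (dx ≠ 0 ∨ dy ≠ 0 ∨ n = 0) →
    iterLoopA fuel x1 y1 (x1 + n * dx) (y1 + n * dy) dx dy =
      (List.range n).map (fun (k : Nat) => (x1 + ((k : Int) + 1) * dx, y1 + ((k : Int) + 1) * dy)) := by
  induction n with
  | zero =>
    intro fuel x1 y1 dx dy _ _
    cases fuel with
    | zero => simp [iterLoopA]
    | succ f => simp [iterLoopA]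
  | succ m ih =>
    intro fuel x1 y1 dx dy hfuel hnz
    cases fuel with
    | zero => omega
    | succ f =>
      have hcond : x1 ≠ x1 + (↑(m + 1)) * dx ∨ y1 ≠ y1 + (↑(m + 1)) * dy := by
        rcases hnz with h | h | h
        · left; intro he; apply h
          have hz : ((m : Int) + 1) * dx = 0 := by push_cast at he ⊢; omega
          rcases mul_eq_zero.mp hz with h0 | h0
          · omega
          · exact h0
        · right; intro he; apply h
          have hz : ((m : Int) + 1) * dy = 0 := by push_cast at he ⊢; omega
          rcases mul_eq_zero.mp hz with h0 | h0
          · omega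
          · exact h0
        · omega
      have hstep1 : x1 + (↑(m + 1)) * dx = (x1 + dx) + (m : Int) * dx := by push_cast; ring
      have hstep2 : y1 + (↑(m + 1)) * dy = (y1 + dy) + (m : Int) * dy := by push_cast; ring
      have hnz' : dx ≠ 0 ∨ dy ≠ 0 ∨ m = 0 := by
        rcases hnz with h | h | h
        · exact Or.inl h
        · exact Or.inr (Or.inl h)
        · omega
      rw [iterLoopA, if_pos hcond, hstep1, hstep2, ih f (x1 + dx) (y1 + dy) dx dy (by omega) hnz']
      rw [List.range_succ_eq_map, List.map_cons, List.map_map]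
      refine congrArg₂ List.cons ?_ ?_
      · push_cast; simp only [Prod.mk.injEq]; constructor <;> ring
      · apply List.map_congr_left
        intro k _
        simp only [Function.comp, Nat.succ_eq_add_one, Prod.mk.injEq]
        push_cast
        constructor <;> ring

-- sign x1 x2 = 0 only when x1 = x2
lemma pvSignZero (a b : Int) : sign a b = 0 ↔ a = b := by
  unfold sign; split_ifs with h1 h2 <;> simp [h1]

-- The endpoint is exactly n = max |dx_total| |dy_total| sign-steps away, on Pre_'s 45°/axis condition.
lemma endpoint_decomp (x1 y1 x2 y2 : Int)
    (hd : x1 = x2 ∨ y1 = y2 ∨ (x2 - x1).natAbs = (y2 - y1).natAbs) :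
    x2 = x1 + (max |x2 - x1| |y2 - y1|) * sign x1 x2 ∧
    y2 = y1 + (max |x2 - x1| |y2 - y1|) * sign y1 y2 := by
  have hd' : x1 = x2 ∨ y1 = y2 ∨ |x2 - x1| = |y2 - y1| := by
    rcases hd with h | h | h
    · exact Or.inl h
    · exact Or.inr (Or.inl h)
    · right; right
      rw [Int.abs_eq_natAbs, Int.abs_eq_natAbs]; exact_mod_cast h
  have a1 := abs_choice (x2 - x1)
  have a2 := abs_choice (y2 - y1)
  have n1 := abs_nonneg (x2 - x1)
  have n2 := abs_nonneg (y2 - y1)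
  have m := max_choice |x2 - x1| |y2 - y1|
  have m1 := le_max_left |x2 - x1| |y2 - y1|
  have m2 := le_max_right |x2 - x1| |y2 - y1|
  unfold sign
  split_ifs <;> constructor <;> omega

-- fuel bound: n steps need at most |n*dx| + |n*dy| fuel when a step moves (or n = 0)
lemma fuel_ge (n : Nat) (x1 y1 dx dy : Int) (hnz : dx ≠ 0 ∨ dy ≠ 0 ∨ n = 0) :
    n ≤ (x1 + n * dx - x1).natAbs + (y1 + n * dy - y1).natAbs := by
  have e1 : (x1 + n * dx - x1).natAbs = n * dx.natAbs := by
    rw [show x1 + n * dx - x1 = (n : Int) * dx by ring, Int.natAbs_mul, Int.natAbs_natCast]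
  have e2 : (y1 + n * dy - y1).natAbs = n * dy.natAbs := by
    rw [show y1 + n * dy - y1 = (n : Int) * dy by ring, Int.natAbs_mul, Int.natAbs_natCast]
  rcases hnz with h | h | h
  · have h1 : 1 ≤ dx.natAbs := Int.natAbs_pos.mpr h
    have : n ≤ n * dx.natAbs := Nat.le_mul_of_pos_right n h1
    omega
  · have h1 : 1 ≤ dy.natAbs := Int.natAbs_pos.mpr h
    have : n ≤ n * dy.natAbs := Nat.le_mul_of_pos_right n h1
    omega
  · omega

lemma main_case (x1 y1 x2 y2 : Int) (allow_diag : Bool)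
    (hpre : allow_diag = true → x1 = x2 ∨ y1 = y2 ∨ (x2 - x1).natAbs = (y2 - y1).natAbs) :
    iter_coords [x1, y1, x2, y2] allow_diag = iter_coords_alt [x1, y1, x2, y2] allow_diag := by
  have e1 : ((if x2 > x1 then (1:Int) else 0) - (if x2 < x1 then 1 else 0)) = sign x1 x2 := by
    unfold sign; split_ifs <;> omega
  have e2 : ((if y2 > y1 then (1:Int) else 0) - (if y2 < y1 then 1 else 0)) = sign y1 y2 := by
    unfold sign; split_ifs <;> omega
  simp only [iter_coords, iter_coords_alt, e1, e2,
    show (([x1, y1, x2, y2] : List Int).length == 4) = true from rfl, if_true,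
    List.getD_cons_zero, List.getD_cons_succ]
  set dx : Int := sign x1 x2 with hdx
  set dy : Int := sign y1 y2 with hdy
  by_cases hg : (allow_diag || dx == 0 || dy == 0) = true
  · rw [if_pos hg, if_pos hg]
    have hd : x1 = x2 ∨ y1 = y2 ∨ (x2 - x1).natAbs = (y2 - y1).natAbs := by
      simp only [Bool.or_eq_true, beq_iff_eq] at hg
      rcases hg with (had | h) | h
      · exact hpre had
      · exact Or.inl ((pvSignZero x1 x2).mp (hdx ▸ h))
      · exact Or.inr (Or.inl ((pvSignZero y1 y2).mp (hdy ▸ h)))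
    obtain ⟨hx, hy⟩ := endpoint_decomp x1 y1 x2 y2 hd
    rw [← hdx] at hx
    rw [← hdy] at hy
    set N : Int := max |x2 - x1| |y2 - y1| with hN
    have hN0 : 0 ≤ N := le_trans (abs_nonneg _) (le_max_left _ _)
    set n : Nat := N.toNat with hn
    have hNn : (n : Int) = N := Int.toNat_of_nonneg hN0
    have hnz : dx ≠ 0 ∨ dy ≠ 0 ∨ n = 0 := by
      by_cases hx0 : dx = 0
      · by_cases hy0 : dy = 0
        · right; right
          have hx12 : x1 = x2 := (pvSignZero x1 x2).mp (hdx ▸ hx0)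
          have hy12 : y1 = y2 := (pvSignZero y1 y2).mp (hdy ▸ hy0)
          simp [hn, hN, hx12, hy12]
        · exact Or.inr (Or.inl hy0)
      · exact Or.inl hx0
    have hx' : x2 = x1 + (n : Int) * dx := by rw [hNn]; exact hx
    have hy' : y2 = y1 + (n : Int) * dy := by rw [hNn]; exact hy
    rw [hx', hy', iterLoopA_counted n _ x1 y1 dx dy (fuel_ge n x1 y1 dx dy hnz) hnz]
    rw [← hNn, show ((n : Int) + 1) = ((n + 1 : Nat) : Int) by push_cast; ring,
        PySem.List.pyRange_zero_natCast, List.map_map, List.range_succ_eq_map, List.map_cons,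
        List.map_map]
    refine congrArg₂ List.cons (by simp) ?_
    apply List.map_congr_left
    intro k _
    simp only [Function.comp, Nat.succ_eq_add_one, Prod.mk.injEq]
    push_cast
    constructor <;> ring
  · rw [if_neg hg, if_neg hg]

-- ===== VERDICT (by name: the statement is the Claim_ definition above) =====
theorem iter_coords_spec : Claim_equal_iter_coords := by
  intro segment allow_diag _ hpre
  obtain ⟨hlen, hdiag⟩ := hpre
  match segment, hlen with
  | [x1, y1, x2, y2], _ =>
    show iter_coords _ _ = iter_coords_alt _ _
    exact main_case x1 y1 x2 y2 allow_diag (by simpa using hdiag)
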